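-- pv_equiv track=rewrite | github.com/javsanmar5/codewars | 3kyu/screen_locking_patterns.py | dfs
-- ===== SOURCE A (Python) =====
-- POSSIBLE_MOVEMENTS = {
--     'A': ['B', 'D', 'E', 'F', 'H'],
--     'B': ['A', 'C', 'D', 'E', 'F', 'G', 'I'],
--     'C': ['B', 'D', 'E', 'F', 'H'],
--     'D': ['A', 'B', 'C', 'E', 'G', 'H', 'I'],
--     'E': ['A', 'B', 'C', 'D', 'F', 'G', 'H', 'I'],
--     'F': ['A', 'B', 'C', 'E', 'G', 'H', 'I'],
--     'G': ['B', 'D', 'E', 'F', 'H'],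
--     'H': ['A', 'C', 'D', 'E', 'F', 'G', 'I'],
--     'I': ['B', 'D', 'E', 'F', 'H']
-- }
--
-- def dfs(point: str, length: int, visited: set, path: list, all_paths: list) -> list:
--     # Base case
--     if length == 1:
--         all_paths.append(path + [point])
--         return all_paths
--
--     visited.add(point)
--     for neighbour in POSSIBLE_MOVEMENTS[point]:
--         if neighbour not in visited:
--             dfs(neighbour, length - 1, visited, path + [point], all_paths)
--     visited.remove(point)
--
--     return all_paths
-- ===== SOURCE B (Python) =====
-- POSSIBLE_MOVEMENTS = {
--     'A': ['B', 'D', 'E', 'F', 'H'],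
--     'B': ['A', 'C', 'D', 'E', 'F', 'G', 'I'],
--     'C': ['B', 'D', 'E', 'F', 'H'],
--     'D': ['A', 'B', 'C', 'E', 'G', 'H', 'I'],
--     'E': ['A', 'B', 'C', 'D', 'F', 'G', 'H', 'I'],
--     'F': ['A', 'B', 'C', 'E', 'G', 'H', 'I'],
--     'G': ['B', 'D', 'E', 'F', 'H'],
--     'H': ['A', 'C', 'D', 'E', 'F', 'G', 'I'],
--     'I': ['B', 'D', 'E', 'F', 'H']
-- }
--
--
-- def dfs(point, length, visited, path, all_paths):
--     # Breadth-first layering: keep a frontier of (point, blocked-set, path-prefix)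
--     # states and expand it level by level; expanding each layer in frontier order
--     # yields exactly the depth-first (lexicographic-by-neighbour) output order.
--     if length < 1:
--         return all_paths
--     frontier = [(point, frozenset(visited), path)]
--     remaining = length
--     while remaining > 1 and frontier:
--         next_frontier = []
--         for p, vis, pth in frontier:
--             blocked = vis | {p}
--             pre = pth + [p]
--             for nb in POSSIBLE_MOVEMENTS[p]:
--                 if nb not in blocked:
--                     next_frontier.append((nb, blocked, pre))
--         frontier = next_frontier
--         remaining -= 1
--     return all_paths + [pth + [p] for p, vis, pth in frontier]
-- ===== Notes on version B (the rewrite author's own statement) =====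
-- stated objective: alternative
-- what changed: A enumerates paths by mutating-recursive depth-first search threading visited/all_paths through the recursion; B is an iterative breadth-first layering that keeps a frontier of (point, blocked-set, prefix) states, expands it level by level in frontier order (which reproduces the DFS output order), and collects the last layer.
import Mathlib
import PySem

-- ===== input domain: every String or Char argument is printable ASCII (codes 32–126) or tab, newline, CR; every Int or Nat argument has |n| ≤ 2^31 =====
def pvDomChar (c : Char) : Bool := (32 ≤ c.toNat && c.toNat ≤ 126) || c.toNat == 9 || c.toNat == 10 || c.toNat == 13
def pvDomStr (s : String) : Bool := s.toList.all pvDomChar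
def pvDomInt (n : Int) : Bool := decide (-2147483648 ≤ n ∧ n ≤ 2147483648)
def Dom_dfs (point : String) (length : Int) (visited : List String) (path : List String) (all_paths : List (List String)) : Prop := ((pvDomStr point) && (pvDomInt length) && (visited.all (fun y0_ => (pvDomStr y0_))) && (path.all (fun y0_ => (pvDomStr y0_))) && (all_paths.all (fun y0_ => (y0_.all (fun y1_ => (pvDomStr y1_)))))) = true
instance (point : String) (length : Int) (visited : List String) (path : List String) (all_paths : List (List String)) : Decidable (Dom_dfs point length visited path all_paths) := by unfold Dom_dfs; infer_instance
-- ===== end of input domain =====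

-- B replaces A's mutating recursive DFS by an iterative breadth-first layering of
-- frontier states, collecting the last layer (objective: alternative decomposition).
-- Equivalence is about the RETURN value only: A mutates visited/all_paths in place, B mutates neither.

-- ===== PORT A =====
-- the module constant POSSIBLE_MOVEMENTS (used by both ports)
def possibleMovements : PySem.Dict String (List String) := PySem.Dict.mk
  [("A", ["B", "D", "E", "F", "H"]),
   ("B", ["A", "C", "D", "E", "F", "G", "I"]),
   ("C", ["B", "D", "E", "F", "H"]),
   ("D", ["A", "B", "C", "E", "G", "H", "I"]),
   ("E", ["A", "B", "C", "D", "F", "G", "H", "I"]),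
   ("F", ["A", "B", "C", "E", "G", "H", "I"]),
   ("G", ["B", "D", "E", "F", "H"]),
   ("H", ["A", "C", "D", "E", "F", "G", "I"]),
   ("I", ["B", "D", "E", "F", "H"])]

-- the nine pattern points (the keys of POSSIBLE_MOVEMENTS); used by A's termination measure and Pre_
def patternKeys : List String := ["A", "B", "C", "D", "E", "F", "G", "H", "I"]

-- termination measure for A's port: recursive calls add an unvisited key to `visited`
def pvMeasure (visited : List String) (point : String) : Nat :=
  2 * (patternKeys.filter (fun k => !(PySem.Set.contains visited k))).length +
    (if PySem.Set.contains visited point then 1 else 0)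

lemma contains_add_eq (v : PySem.Set String) (p k : String) :
    List.contains (PySem.Set.add v p) k = (List.contains v k || k == p) := by
  by_cases hp : p ∈ v
  · by_cases hk : k = p
    · subst hk; simp [PySem.Set.add, PySem.Set.contains, hp]
    · simp [PySem.Set.add, PySem.Set.contains, hp, hk]
  · by_cases hk : k = p
    · subst hk; simp [PySem.Set.add, PySem.Set.contains, hp]
    · simp [PySem.Set.add, PySem.Set.contains, hp, hk]

lemma length_filter_lt_of {a : Type} (l : List a) (p q : a → Bool)
    (h : ∀ x ∈ l, p x = true → q x = true)
    (w : a) (hw : w ∈ l) (hq : q w = true) (hp : p w = false) :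
    (l.filter p).length < (l.filter q).length := by
  induction l with
  | nil => cases hw
  | cons x xs ih =>
    have hmono : (xs.filter p).length ≤ (xs.filter q).length := by
      rw [← List.countP_eq_length_filter, ← List.countP_eq_length_filter]
      exact List.countP_mono_left (fun y hy => h y (List.mem_cons_of_mem x hy))
    rcases List.mem_cons.mp hw with hwx | hwxs
    · subst hwx
      simp only [List.filter_cons, hp, hq]
      simp; omega
    · have hx : p x = true → q x = true := h x (List.mem_cons_self ..)
      have hlt := ih (fun y hy hpy => h y (List.mem_cons_of_mem x hy) hpy) hwxs
      by_cases hpx : p x = true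
      · simp only [List.filter_cons, hpx, hx hpx]; simp; omega
      · rw [Bool.not_eq_true] at hpx
        simp only [List.filter_cons, hpx]
        by_cases hqx : q x = true <;> simp [hqx] <;> omega

lemma key_mem_of_get? (p : String) (nbrs : List String)
    (h : possibleMovements.get? p = some nbrs) : p ∈ patternKeys := by
  by_contra hp
  simp only [patternKeys, List.mem_cons, List.not_mem_nil, or_false, not_or] at hp
  obtain ⟨h1, h2, h3, h4, h5, h6, h7, h8, h9⟩ := hp
  simp [possibleMovements, PySem.Dict.get?,
    Ne.symm h1, Ne.symm h2, Ne.symm h3, Ne.symm h4, Ne.symm h5,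
    Ne.symm h6, Ne.symm h7, Ne.symm h8, Ne.symm h9] at h

lemma pvMeasure_lt (visited : List String) (point n : String) (nbrs : List String)
    (hk : possibleMovements.get? point = some nbrs)
    (hn : ¬ PySem.Set.contains (PySem.Set.add visited point) n = true) :
    pvMeasure (PySem.Set.add visited point) n < pvMeasure visited point := by
  unfold pvMeasure
  simp only [PySem.Set.contains] at hn ⊢
  rw [Bool.not_eq_true] at hn
  simp only [hn]
  by_cases hv : List.contains visited point = true
  · have hmem : point ∈ visited := by simpa using hv
    have hadd : PySem.Set.add visited point = visited := by
      simp [PySem.Set.add, PySem.Set.contains, hmem]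
    rw [hadd]
    simp [hmem]
  · rw [Bool.not_eq_true] at hv
    have hlt := length_filter_lt_of patternKeys
      (fun k => !(List.contains (PySem.Set.add visited point) k))
      (fun k => !(List.contains visited k))
      (by intro x _ hx
          simp only [contains_add_eq, Bool.not_eq_true', Bool.or_eq_false_iff] at hx
          simpa using hx.1)
      point (key_mem_of_get? point nbrs hk)
      (by simp only [Bool.not_eq_true']; exact hv)
      (by simp)
    simp only [hv, Bool.false_eq_true, if_false]
    omega

-- port of A: recursive DFS threading the all_paths accumulator through a loop over the neighbours
def dfs (point : String) (length : Int) (visited : List String) (path : List String) (all_paths : List (List String)) : List (List String) :=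
  if length == 1 then
    all_paths ++ [path ++ [point]]
  else
    match hk : possibleMovements.get? point with
    | none => all_paths   -- Python raises KeyError here; excluded by Pre_dfs
    | some nbrs =>
      let v := PySem.Set.add visited point
      nbrs.foldl (fun acc neighbour =>
        if hn : PySem.Set.contains v neighbour = true then acc
        else dfs neighbour (length - 1) v (path ++ [point]) acc) all_paths
termination_by pvMeasure visited point
decreasing_by exact pvMeasure_lt visited point neighbour nbrs hk hn

-- ===== PORT B =====
-- one level of the breadth-first layering: extend every frontier state by each legal neighbour
def expandFrontier (frontier : List (String × List String × List String)) : List (String × List String × List String) :=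
  frontier.flatMap (fun s =>
    let blocked := PySem.Set.add s.2.1 s.1
    let pre := s.2.2 ++ [s.1]
    -- Python does POSSIBLE_MOVEMENTS[p]; a missing key raises KeyError there, excluded by Pre_dfs
    ((possibleMovements.get? s.1).getD []).flatMap (fun nb =>
      if PySem.Set.contains blocked nb then [] else [(nb, blocked, pre)]))

-- the while-loop of B: n = number of expansion rounds still to do (remaining - 1)
def bfsLoop : List (String × List String × List String) → Nat → List (List String)
  | frontier, 0 => frontier.map (fun s => s.2.2 ++ [s.1])
  | frontier, Nat.succ n =>
      if frontier.isEmpty then frontier.map (fun s => s.2.2 ++ [s.1])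
      else bfsLoop (expandFrontier frontier) n

def dfs_alt (point : String) (length : Int) (visited : List String) (path : List String) (all_paths : List (List String)) : List (List String) :=
  if length < 1 then all_paths
  else all_paths ++ bfsLoop [(point, visited, path)] (length - 1).toNat

-- ===== PRECONDITION & SPEC =====
-- Pre_ excludes exactly the inputs where the Python A raises KeyError: length ≠ 1 and point not a key of POSSIBLE_MOVEMENTS
def Pre_dfs (point : String) (length : Int) (visited : List String) (path : List String) (all_paths : List (List String)) : Prop :=
  length = 1 ∨ point ∈ patternKeys
instance (point : String) (length : Int) (visited : List String) (path : List String) (all_paths : List (List String)) : Decidable (Pre_dfs point length visited path all_paths) := by unfold Pre_dfs; infer_instance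

def pvWitness_dfs : String × Int × List String × List String × List (List String) :=
  ("A", 3, ["B"], [], [])

def Spec_dfs (point : String) (length : Int) (visited : List String) (path : List String) (all_paths : List (List String)) (out : List (List String)) : Prop := out = dfs_alt point length visited path all_paths
instance (point : String) (length : Int) (visited : List String) (path : List String) (all_paths : List (List String)) (out : List (List String)) : Decidable (Spec_dfs point length visited path all_paths out) := by unfold Spec_dfs; infer_instance

-- ===== CLAIM (what is proved, stated in full; the proofs are below) =====
def Claim_equal_dfs : Prop := ∀ (point : String) (length : Int) (visited : List String) (path : List String) (all_paths : List (List String)), Dom_dfs point length visited path all_paths → Pre_dfs point length visited path all_paths → Spec_dfs point length visited path all_paths (dfs point length visited path all_paths)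

-- ===== LEMMAS AND PROOFS =====

-- proof-only characterisation: the list of valid path tails of length n starting at p
def tails (p : String) (v : List String) : Nat → List (List String)
  | 0 => []
  | 1 => [[p]]
  | Nat.succ (Nat.succ n) =>
      match possibleMovements.get? p with
      | none => []
      | some nbrs =>
        let blocked := PySem.Set.add v p
        nbrs.flatMap (fun nb =>
          if PySem.Set.contains blocked nb then []
          else (tails nb blocked (n + 1)).map (fun rest => p :: rest))

lemma dfs_nonpos (p : String) (l : Int) (v pth : List String) (acc : List (List String)) :
    l ≤ 0 → dfs p l v pth acc = acc := by
  fun_induction dfs p l v pth acc with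
  | case1 p l v pa a hl =>
    intro h; simp only [beq_iff_eq] at hl; omega
  | case2 p l v pa a hl hk => intro _; rfl
  | case3 p l v pa a hl nbrs hk w ih =>
    intro h
    suffices hgen : ∀ acc0, nbrs.foldl (fun acc neighbour =>
        if _hn : PySem.Set.contains w neighbour = true then acc
        else dfs neighbour (l - 1) w (pa ++ [p]) acc) acc0 = acc0 by
      exact hgen a
    have ih' : ∀ x, ¬ PySem.Set.contains w x = true →
        ∀ acc1, dfs x (l - 1) w (pa ++ [p]) acc1 = acc1 := by
      intro x hx acc1; exact ih acc1 x hx (by omega)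
    clear ih hk
    intro acc0
    induction nbrs generalizing acc0 with
    | nil => rfl
    | cons x xs ihx =>
      simp only [List.foldl_cons]
      by_cases hx : PySem.Set.contains w x = true
      · rw [dif_pos hx]; exact ihx acc0
      · rw [dif_neg hx, ih' x hx acc0]; exact ihx acc0

lemma dfs_pos (p : String) (l : Int) (v pth : List String) (acc : List (List String)) :
    1 ≤ l → dfs p l v pth acc = acc ++ (tails p v l.toNat).map (fun t => pth ++ t) := by
  fun_induction dfs p l v pth acc with
  | case1 p l v pa a hl =>
    intro _
    simp only [beq_iff_eq] at hl; subst hl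
    simp [tails]
  | case2 p l v pa a hl hk =>
    intro _
    simp only [beq_iff_eq] at hl
    have h2 : l.toNat = (l.toNat - 2) + 2 := by omega
    rw [h2]
    simp [tails, hk]
  | case3 p l v pa a hl nbrs hk w ih =>
    intro h
    simp only [beq_iff_eq] at hl
    have h2 : l.toNat = (l.toNat - 2) + 2 := by omega
    have h3 : (l - 1).toNat = (l.toNat - 2) + 1 := by omega
    have hbody : (fun (acc : List (List String)) (x : String) =>
          if _hn : PySem.Set.contains w x = true then acc
          else dfs x (l - 1) w (pa ++ [p]) acc)
        = (fun acc x => acc ++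
          (if PySem.Set.contains w x = true then []
           else (tails x w ((l.toNat - 2) + 1)).map (fun rest => (pa ++ [p]) ++ rest))) := by
      funext acc x
      by_cases hx : PySem.Set.contains w x = true
      · rw [dif_pos hx, if_pos hx, List.append_nil]
      · rw [dif_neg hx, if_neg hx, ih acc x hx (by omega), h3]
    rw [hbody, PySem.List.foldl_append_eq_flatMap, h2]
    simp only [tails, hk]
    rw [List.map_flatMap]
    congr 1
    apply congrArg (fun f => List.flatMap f nbrs)
    funext x
    by_cases hx : PySem.Set.contains w x = true
    · have hx2 : PySem.Set.contains (PySem.Set.add v p) x = true := hx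
      rw [if_pos hx, if_pos hx2]
      simp
    · have hx2 : ¬ PySem.Set.contains (PySem.Set.add v p) x = true := hx
      rw [if_neg hx, if_neg hx2, List.map_map]
      apply List.map_congr_left
      intro rest _
      simp

lemma bfsLoop_eq_tails (n : Nat) (frontier : List (String × List String × List String)) :
    bfsLoop frontier n =
      frontier.flatMap (fun s => (tails s.1 s.2.1 (n + 1)).map (fun t => s.2.2 ++ t)) := by
  induction n generalizing frontier with
  | zero =>
    simp only [bfsLoop, tails]
    induction frontier with
    | nil => rfl
    | cons a t iht => simp_all
  | succ n ihn =>
    by_cases hf : frontier.isEmpty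
    · have he : frontier = [] := List.isEmpty_iff.mp hf
      subst he
      simp [bfsLoop]
    · rw [bfsLoop, if_neg hf, ihn]
      unfold expandFrontier
      rw [List.flatMap_assoc]
      apply congrArg (fun f => List.flatMap f frontier)
      funext s
      obtain ⟨p, vv, pth⟩ := s
      simp only
      match hk : possibleMovements.get? p with
      | none => simp [tails, hk]
      | some nbrs =>
        simp only [hk, Option.getD_some, tails, List.map_flatMap, List.flatMap_assoc]
        apply congrArg (fun f => List.flatMap f nbrs)
        funext nb
        split_ifs with hx
        · simp
        · simp only [List.flatMap_cons, List.flatMap_nil, List.append_nil,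
            List.map_map]
          apply List.map_congr_left
          intro rest _
          simp

-- ===== VERDICT (by name: the statement is the Claim_ definition above) =====
theorem dfs_spec : Claim_equal_dfs := by
  intro point length visited path all_paths _ _
  unfold Spec_dfs dfs_alt
  by_cases hl : length < 1
  · rw [if_pos hl, dfs_nonpos point length visited path all_paths (by omega)]
  · rw [if_neg hl, bfsLoop_eq_tails]
    have h1 : (length - 1).toNat + 1 = length.toNat := by omega
    simp only [List.flatMap_cons, List.flatMap_nil, List.append_nil, h1]
    exact dfs_pos point length visited path all_paths (by omega)
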